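-- pv_equiv track=rewrite | github.com/hdashnow/STRtable | scripts/gnomad-json.py | cyclical_variations
-- ===== SOURCE A (Python) =====
-- def cyclical_variations(motifs):
--     # builds the set of all possible motifs with a given motif
--     # Motifs with N in them are all permuted with combination of all nucleotides
--     nucs = ['A', 'C', 'G', 'T']
--     variations = []
--     for motif in motifs:
--         if 'N' in motif:
--             for n in nucs:
--                 variations += cyclical_variations([motif.replace('N', n)])
--         variations += [motif[-i:]+motif[:-i] for i in range(len(motif))]
--     return variations
-- ===== SOURCE B (Python) =====
-- def cyclical_variations(motifs):
--     # Phase 1: build the flat list of concrete motifs (N expanded to A/C/G/T,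
--     # then the literal motif itself); Phase 2: one flat pass of rotations.
--     nucs = ['A', 'C', 'G', 'T']
--     concrete = []
--     for motif in motifs:
--         if 'N' in motif:
--             concrete += [motif.replace('N', n) for n in nucs]
--         concrete.append(motif)
--     return [m[-i:] + m[:-i] for m in concrete for i in range(len(m))]
-- ===== Notes on version B (the rewrite author's own statement) =====
-- stated objective: simpler
-- what changed: Replaces A's self-recursion (only ever one level deep) by two non-recursive phases: first build the flat list of concrete motifs (the four N-substitutions in A/C/G/T order, then the literal motif), then emit the cyclical rotations of each in one flat comprehension.
import Mathlib
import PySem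

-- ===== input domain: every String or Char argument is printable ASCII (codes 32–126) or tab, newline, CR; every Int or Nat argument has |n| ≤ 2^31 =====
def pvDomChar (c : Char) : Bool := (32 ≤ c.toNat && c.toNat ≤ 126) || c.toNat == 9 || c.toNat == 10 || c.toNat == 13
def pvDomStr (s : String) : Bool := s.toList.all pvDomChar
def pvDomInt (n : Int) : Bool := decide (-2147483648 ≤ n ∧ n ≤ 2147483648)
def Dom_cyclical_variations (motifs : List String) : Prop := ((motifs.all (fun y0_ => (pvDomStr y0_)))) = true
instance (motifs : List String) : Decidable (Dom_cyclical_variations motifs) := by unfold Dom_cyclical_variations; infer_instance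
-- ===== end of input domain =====

-- B replaces A's one-level self-recursion by a two-phase pass (build the concrete motifs, then rotate them all); objective: simpler.

-- The next three lemmas are cited by the port's decreasing_by (termination of A's
-- self-recursion): replacing every 'N' by an 'N'-free string leaves no 'N'.
theorem pv_go_no_N (new : List Char) (hc : 'N' ∉ new) :
    ∀ (fuel : Nat) (l acc : List Char), l.length ≤ fuel → 'N' ∉ acc →
      'N' ∉ PySem.Chars.replace.go ['N'] new fuel l acc := by
  intro fuel
  induction fuel with
  | zero =>
      intro l acc hl hacc
      have hnil : l = [] := List.eq_nil_of_length_eq_zero (Nat.le_zero.mp hl)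
      subst hnil
      rw [PySem.Chars.replace.go]
      simpa using hacc
  | succ n ih =>
      intro l acc hl hacc
      cases l with
      | nil =>
          rw [PySem.Chars.replace.go]
          all_goals first | omega | simpa using hacc
      | cons d t =>
          rw [PySem.Chars.replace.go]
          split
          · -- prefix found: consume it, push `new` (reversed) on the accumulator
            apply ih _ _ (by simpa using Nat.le_of_succ_le_succ hl)
            simp only [List.mem_append, List.mem_reverse]
            rintro (h | h)
            · exact hc h
            · exact hacc h
          · -- no prefix here: keep the head character
            rename_i hp
            have hd : 'N' ≠ d := by
              intro hEq; exact hp (by simp [List.isPrefixOf]; exact hEq)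
            apply ih _ _ (by simpa using Nat.le_of_succ_le_succ hl)
            simp only [List.mem_cons]
            rintro (h | h)
            · exact hd h
            · exact hacc h

theorem pv_no_N_replace (m n : String) (hn : 'N' ∉ n.toList) :
    'N' ∉ (PySem.Str.replace m "N" n).toList := by
  have h1 : ("N" : String).toList = ['N'] := by decide
  rw [PySem.Str.toList_replace, h1, PySem.Chars.replace]
  simp only [List.isEmpty_cons, Bool.false_eq_true, if_false]
  exact pv_go_no_N n.toList hn m.toList.length m.toList [] le_rfl (by simp)

theorem pv_isIn_N (m : String) : PySem.Str.isIn "N" m = true ↔ 'N' ∈ m.toList := by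
  rw [PySem.Str.isIn_iff_infix]
  constructor
  · intro h; exact h.mem (by decide)
  · intro h
    obtain ⟨pre, suf, hps⟩ := List.append_of_mem h
    exact ⟨pre, suf, by simp [hps]⟩

def pvCountN (motifs : List String) : Nat :=
  (motifs.map (fun m => m.toList.count 'N')).sum + motifs.length

-- ===== PORT A =====
def cyclical_variations (motifs : List String) : List String :=
  match motifs with
  | [] => []
  | motif :: rest =>
      (if h : PySem.Str.isIn "N" motif then
        (["A", "C", "G", "T"].attach.foldl
          (fun variations n => variations ++ cyclical_variations [PySem.Str.replace motif "N" n.1]) [])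
       else []) ++
      ((PySem.List.pyRange 0 (PySem.Str.len motif) 1).map
        (fun i => PySem.Str.slice motif (some (-i)) none ++ PySem.Str.slice motif none (some (-i)))) ++
      cyclical_variations rest
termination_by pvCountN motifs
decreasing_by
  · have hn : 'N' ∉ (n.1).toList := by
      have h2 := n.2
      simp only [List.mem_cons, List.not_mem_nil, or_false] at h2
      rcases h2 with h2 | h2 | h2 | h2 <;> (rw [h2]; decide)
    have h1 : (PySem.Str.replace motif "N" n.1).toList.count 'N' = 0 :=
      List.count_eq_zero.mpr (pv_no_N_replace motif n.1 hn)
    have h2 : 1 ≤ motif.toList.count 'N' :=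
      List.one_le_count_iff.mpr ((pv_isIn_N motif).mp h)
    simp only [pvCountN, List.map_cons, List.map_nil, List.sum_cons, List.sum_nil,
      List.length_cons, List.length_nil, h1]
    omega
  · simp only [pvCountN, List.map_cons, List.sum_cons, List.length_cons]
    omega

-- ===== PORT B =====
def rotations (m : String) : List String :=
  (PySem.List.pyRange 0 (PySem.Str.len m) 1).map
    (fun i => PySem.Str.slice m (some (-i)) none ++ PySem.Str.slice m none (some (-i)))

def cyclical_variations_alt (motifs : List String) : List String :=
  (motifs.foldl
    (fun concrete motif =>
      (if PySem.Str.isIn "N" motif then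
        concrete ++ ["A", "C", "G", "T"].map (fun n => PySem.Str.replace motif "N" n)
       else concrete) ++ [motif]) []).flatMap rotations

-- ===== PRECONDITION & SPEC =====
def Spec_cyclical_variations (motifs : List String) (out : List String) : Prop := out = cyclical_variations_alt motifs
instance (motifs : List String) (out : List String) : Decidable (Spec_cyclical_variations motifs out) := by unfold Spec_cyclical_variations; infer_instance

-- ===== CLAIM (what is proved, stated in full; the proofs are below) =====
def Claim_equal_cyclical_variations : Prop := ∀ (motifs : List String), Dom_cyclical_variations motifs → Spec_cyclical_variations motifs (cyclical_variations motifs)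

-- ===== LEMMAS AND PROOFS =====

theorem pv_isIn_eq (m : String) : PySem.Str.isIn "N" m = PySem.Chars.isIn ['N'] m.toList := by
  have h1 : ("N" : String).toList = ['N'] := by decide
  simp [h1]

theorem pv_cv_nil : cyclical_variations [] = [] := by rw [cyclical_variations]

-- per-motif contribution shared by both directions of the proof
def pvStep (motif : String) : List String :=
  (if PySem.Str.isIn "N" motif then
    (["A", "C", "G", "T"].map (fun n => PySem.Str.replace motif "N" n)).flatMap rotations
   else []) ++ rotations motif

theorem pv_cv_no_N (m : String) (hm : 'N' ∉ m.toList) :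
    cyclical_variations [m] = rotations m := by
  have hC : PySem.Chars.isIn ['N'] m.toList = false := by
    rw [← pv_isIn_eq]
    cases hx : PySem.Str.isIn "N" m
    · rfl
    · exact absurd ((pv_isIn_N m).mp hx) hm
  rw [cyclical_variations]
  simp [hC, pv_cv_nil, rotations]

theorem pv_cv_cons (m : String) (rest : List String) :
    cyclical_variations (m :: rest) = pvStep m ++ cyclical_variations rest := by
  rw [cyclical_variations, pvStep]
  by_cases h : PySem.Str.isIn "N" m = true
  · simp only [h, dif_pos, if_pos, List.attach, List.attachWith, List.pmap, List.foldl]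
    have hrw : ∀ n : String, 'N' ∉ n.toList →
        cyclical_variations [PySem.Str.replace m "N" n] = rotations (PySem.Str.replace m "N" n) :=
      fun n hn => pv_cv_no_N _ (pv_no_N_replace m n hn)
    rw [hrw "A" (by decide), hrw "C" (by decide), hrw "G" (by decide), hrw "T" (by decide)]
    simp [rotations]
  · simp only [h, dif_neg, if_neg, Bool.false_eq_true, not_false_iff]
    simp [rotations]

theorem pv_alt_concrete (motifs : List String) (init : List String) :
    motifs.foldl
      (fun concrete motif =>
        (if PySem.Str.isIn "N" motif then
          concrete ++ ["A", "C", "G", "T"].map (fun n => PySem.Str.replace motif "N" n)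
         else concrete) ++ [motif]) init
    = init ++ motifs.flatMap (fun motif =>
        (if PySem.Str.isIn "N" motif then
          ["A", "C", "G", "T"].map (fun n => PySem.Str.replace motif "N" n)
         else []) ++ [motif]) := by
  induction motifs generalizing init with
  | nil => simp
  | cons m rest ih =>
      simp only [List.foldl_cons, List.flatMap_cons, ih]
      cases hx : PySem.Chars.isIn ['N'] m.toList <;> simp [hx]

theorem pv_alt_flatMap (motifs : List String) :
    cyclical_variations_alt motifs = motifs.flatMap pvStep := by
  rw [cyclical_variations_alt, pv_alt_concrete]
  rw [List.nil_append, List.flatMap_assoc]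
  apply List.flatMap_congr  -- pointwise equality of the two per-motif blocks
  intro m _
  rw [pvStep]
  cases hx : PySem.Chars.isIn ['N'] m.toList <;> simp [hx]

-- ===== VERDICT (by name: the statement is the Claim_ definition above) =====
theorem cyclical_variations_spec : Claim_equal_cyclical_variations := by
  intro motifs hdom
  clear hdom
  unfold Spec_cyclical_variations
  rw [pv_alt_flatMap]
  induction motifs with
  | nil => rw [pv_cv_nil, List.flatMap_nil]
  | cons m rest ih => rw [pv_cv_cons, List.flatMap_cons, ih]
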